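-- pv_equiv track=rewrite | github.com/gksgpd97/algorithm | 17_search_rank.py | calc
-- ===== SOURCE A (Python) =====
-- import bisect
--
-- lg = ["cpp","java","python"]
--
-- work = ["backend", "frontend"]
--
-- career = ["senior", "junior"]
--
-- food = ["pizza","chicken"]
--
-- def calc(table, a, b, c, d, e):
--     rst = 0
--     if a == '-':
--         for item in lg:
--             rst+=calc(table,item,b,c,d,e)
--     elif b == '-':
--         for item in work:
--             rst+=calc(table,a,item,c,d,e)
--     elif c == '-':
--         for item in career:
--             rst+=calc(table,a,b,item,d,e)
--     elif d == '-':
--         for item in food: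
--             rst+=calc(table,a,b,c,item,e)
--     else:
--         idx = bisect.bisect_left(table[a][b][c][d], e)
--         rst = len(table[a][b][c][d])-idx
--     return rst
-- ===== SOURCE B (Python) =====
-- import bisect
-- from itertools import product
--
-- lg = ["cpp","java","python"]
-- work = ["backend", "frontend"]
-- career = ["senior", "junior"]
-- food = ["pizza","chicken"]
--
-- def calc(table, a, b, c, d, e):
--     cands = [cat if x == '-' else [x] for x, cat in ((a, lg), (b, work), (c, career), (d, food))]
--     total = 0
--     for a2, b2, c2, d2 in product(*cands):
--         scores = table[a2][b2][c2][d2]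
--         total += len(scores) - bisect.bisect_left(scores, e)
--     return total
-- ===== Notes on version B (the rewrite author's own statement) =====
-- stated objective: alternative
-- what changed: Replaces A's recursive wildcard expansion (one recursive call per '-' argument) with a single itertools.product loop over per-argument candidate lists, adding len(scores) - bisect_left(scores, e) for each expanded key tuple.
import Mathlib
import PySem

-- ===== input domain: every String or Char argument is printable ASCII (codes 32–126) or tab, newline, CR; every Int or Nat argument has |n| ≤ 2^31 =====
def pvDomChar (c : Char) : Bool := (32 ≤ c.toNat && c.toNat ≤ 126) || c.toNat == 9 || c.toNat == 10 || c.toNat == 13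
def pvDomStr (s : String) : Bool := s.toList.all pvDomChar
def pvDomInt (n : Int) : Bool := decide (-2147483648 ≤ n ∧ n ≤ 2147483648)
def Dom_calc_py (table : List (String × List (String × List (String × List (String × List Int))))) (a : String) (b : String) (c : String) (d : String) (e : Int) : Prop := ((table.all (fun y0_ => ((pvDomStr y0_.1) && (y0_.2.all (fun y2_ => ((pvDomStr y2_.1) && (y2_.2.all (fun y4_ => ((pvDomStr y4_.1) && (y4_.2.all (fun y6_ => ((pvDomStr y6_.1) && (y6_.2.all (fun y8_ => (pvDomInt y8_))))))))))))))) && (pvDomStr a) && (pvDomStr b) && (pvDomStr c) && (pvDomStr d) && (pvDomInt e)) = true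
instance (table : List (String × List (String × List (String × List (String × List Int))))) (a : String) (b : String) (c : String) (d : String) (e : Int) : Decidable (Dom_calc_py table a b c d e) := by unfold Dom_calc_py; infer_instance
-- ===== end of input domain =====

-- B replaces A's recursive wildcard expansion by one explicit product iteration over the
-- per-argument candidate lists (objective: alternative decomposition; return values identical on Pre_).

-- ===== PORT A =====
-- the module constants lg / work / career / food
def pvLg : List String := ["cpp", "java", "python"]
def pvWork : List String := ["backend", "frontend"]
def pvCareer : List String := ["senior", "junior"]
def pvFood : List String := ["pizza", "chicken"]

-- bisect.bisect_left (the library binary search both Pythons call), exact on lists of ints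
def bisectLeftGo (xs : List Int) (x : Int) (lo hi : Nat) : Nat :=
  if lo < hi then
    let mid := (lo + hi) / 2
    if xs.getD mid 0 < x then bisectLeftGo xs x (mid + 1) hi
    else bisectLeftGo xs x lo mid
  else lo
termination_by hi - lo
decreasing_by all_goals omega

def bisectLeft (xs : List Int) (x : Int) : Nat := bisectLeftGo xs x 0 xs.length

-- table[a][b][c][d]: first-match dict lookup at each level; the [] defaults are only reached
-- where Python raises KeyError, which Pre_calc_py excludes
def tabGet (table : List (String × List (String × List (String × List (String × List Int))))) (a b c d : String) : List Int :=
  ((((((table.lookup a).getD []).lookup b).getD []).lookup c).getD []).lookup d |>.getD []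

def calc_py (table : List (String × List (String × List (String × List (String × List Int))))) (a : String) (b : String) (c : String) (d : String) (e : Int) : Int :=
  if a = "-" then
    pvLg.attach.foldl (fun rst item => rst + calc_py table item.1 b c d e) 0
  else if b = "-" then
    pvWork.attach.foldl (fun rst item => rst + calc_py table a item.1 c d e) 0
  else if c = "-" then
    pvCareer.attach.foldl (fun rst item => rst + calc_py table a b item.1 d e) 0
  else if d = "-" then
    pvFood.attach.foldl (fun rst item => rst + calc_py table a b c item.1 e) 0
  else
    let idx := bisectLeft (tabGet table a b c d) e
    ((tabGet table a b c d).length : Int) - idx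
termination_by ((if a = "-" then 1 else 0) + (if b = "-" then 1 else 0) + (if c = "-" then 1 else 0) + (if d = "-" then 1 else 0) : Nat)
decreasing_by
  · have hne : item.1 ≠ "-" := by
      have h2 := item.2; simp [pvLg] at h2; rcases h2 with h | h | h <;> simp [h]
    simp_all
  · have hne : item.1 ≠ "-" := by
      have h2 := item.2; simp [pvWork] at h2; rcases h2 with h | h <;> simp [h]
    simp_all
  · have hne : item.1 ≠ "-" := by
      have h2 := item.2; simp [pvCareer] at h2; rcases h2 with h | h <;> simp [h]
    simp_all
  · have hne : item.1 ≠ "-" := by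
      have h2 := item.2; simp [pvFood] at h2; rcases h2 with h | h <;> simp [h]
    simp_all

-- ===== PORT B =====
-- candidate list for one argument: the whole category if it is the wildcard, else just itself
def cand (x : String) (cat : List String) : List String := if x = "-" then cat else [x]

def calc_py_alt (table : List (String × List (String × List (String × List (String × List Int))))) (a : String) (b : String) (c : String) (d : String) (e : Int) : Int :=
  let tuples :=
    (cand a pvLg).flatMap fun a2 =>
      (cand b pvWork).flatMap fun b2 =>
        (cand c pvCareer).flatMap fun c2 =>
          (cand d pvFood).map fun d2 => (a2, b2, c2, d2)
  tuples.foldl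
    (fun total p =>
      let scores := tabGet table p.1 p.2.1 p.2.2.1 p.2.2.2
      total + ((scores.length : Int) - bisectLeft scores e))
    0

-- ===== PRECONDITION & SPEC =====
-- Pre_ excludes exactly the inputs on which Python A raises KeyError: some expanded key
-- combination whose lookup chain hits a missing key.
def Pre_calc_py (table : List (String × List (String × List (String × List (String × List Int))))) (a : String) (b : String) (c : String) (d : String) (_e : Int) : Prop :=
  ∀ a2 ∈ cand a pvLg, (table.lookup a2).isSome = true ∧
    ∀ b2 ∈ cand b pvWork, (((table.lookup a2).getD []).lookup b2).isSome = true ∧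
      ∀ c2 ∈ cand c pvCareer, (((((table.lookup a2).getD []).lookup b2).getD []).lookup c2).isSome = true ∧
        ∀ d2 ∈ cand d pvFood, (((((((table.lookup a2).getD []).lookup b2).getD []).lookup c2).getD []).lookup d2).isSome = true
instance (table : List (String × List (String × List (String × List (String × List Int))))) (a : String) (b : String) (c : String) (d : String) (e : Int) : Decidable (Pre_calc_py table a b c d e) := by unfold Pre_calc_py; infer_instance

def pvWitness_calc_py : (List (String × List (String × List (String × List (String × List Int))))) × String × String × String × String × Int :=
  ([("cpp", [("backend", [("senior", [("pizza", [1, 2, 3]), ("chicken", [2, 2])])])])], "cpp", "backend", "senior", "-", 2)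

def Spec_calc_py (table : List (String × List (String × List (String × List (String × List Int))))) (a : String) (b : String) (c : String) (d : String) (e : Int) (out : Int) : Prop := out = calc_py_alt table a b c d e
instance (table : List (String × List (String × List (String × List (String × List Int))))) (a : String) (b : String) (c : String) (d : String) (e : Int) (out : Int) : Decidable (Spec_calc_py table a b c d e out) := by unfold Spec_calc_py; infer_instance

-- ===== CLAIM (what is proved, stated in full; the proofs are below) =====
def Claim_equal_calc_py : Prop := ∀ (table : List (String × List (String × List (String × List (String × List Int))))) (a : String) (b : String) (c : String) (d : String) (e : Int), Dom_calc_py table a b c d e → Pre_calc_py table a b c d e → Spec_calc_py table a b c d e (calc_py table a b c d e)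

-- ===== LEMMAS AND PROOFS =====

-- score count at one concrete key tuple
def pvVal (table : List (String × List (String × List (String × List (String × List Int))))) (a b c d : String) (e : Int) : Int :=
  ((tabGet table a b c d).length : Int) - bisectLeft (tabGet table a b c d) e

theorem pv_foldl_add {α : Type} (g : α → Int) (l : List α) (init : Int) :
    l.foldl (fun t p => t + g p) init = init + (l.map g).sum := by
  induction l generalizing init with
  | nil => simp
  | cons x xs ih => simp [List.foldl, ih]; ring

theorem pv_sum_flatMap {α β : Type} (g : α → List β) (f : β → Int) (l : List α) :
    ((l.flatMap g).map f).sum = (l.map (fun x => ((g x).map f).sum)).sum := by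
  induction l with
  | nil => simp
  | cons x xs ih => simp [ih]

theorem calc_leaf (table : List (String × List (String × List (String × List (String × List Int))))) (a b c d : String) (e : Int)
    (ha : ¬ a = "-") (hb : ¬ b = "-") (hc : ¬ c = "-") (hd : ¬ d = "-") :
    calc_py table a b c d e = pvVal table a b c d e := by
  rw [calc_py]; simp [ha, hb, hc, hd, pvVal]

theorem calc_d (table : List (String × List (String × List (String × List (String × List Int))))) (a b c d : String) (e : Int)
    (ha : ¬ a = "-") (hb : ¬ b = "-") (hc : ¬ c = "-") :
    calc_py table a b c d e = ((cand d pvFood).map (fun d2 => pvVal table a b c d2 e)).sum := by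
  by_cases hd : d = "-"
  · rw [calc_py]
    simp [ha, hb, hc, hd, cand, pvFood, List.attach, List.attachWith, List.foldl]
    rw [calc_leaf table a b c "pizza" e ha hb hc (by decide),
        calc_leaf table a b c "chicken" e ha hb hc (by decide)]
  · rw [calc_leaf table a b c d e ha hb hc hd]; simp [cand, hd]

theorem calc_c (table : List (String × List (String × List (String × List (String × List Int))))) (a b c d : String) (e : Int)
    (ha : ¬ a = "-") (hb : ¬ b = "-") :
    calc_py table a b c d e =
      ((cand c pvCareer).map (fun c2 => ((cand d pvFood).map (fun d2 => pvVal table a b c2 d2 e)).sum)).sum := by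
  by_cases hc : c = "-"
  · rw [calc_py]
    simp [ha, hb, hc, pvCareer, List.attach, List.attachWith, List.foldl]
    rw [calc_d table a b "senior" d e ha hb (by decide),
        calc_d table a b "junior" d e ha hb (by decide)]
    simp [cand]
  · rw [calc_d table a b c d e ha hb hc]; simp [cand, hc]

theorem calc_b (table : List (String × List (String × List (String × List (String × List Int))))) (a b c d : String) (e : Int)
    (ha : ¬ a = "-") :
    calc_py table a b c d e =
      ((cand b pvWork).map (fun b2 =>
        ((cand c pvCareer).map (fun c2 => ((cand d pvFood).map (fun d2 => pvVal table a b2 c2 d2 e)).sum)).sum)).sum := by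
  by_cases hb : b = "-"
  · rw [calc_py]
    simp [ha, hb, pvWork, List.attach, List.attachWith, List.foldl]
    rw [calc_c table a "backend" c d e ha (by decide),
        calc_c table a "frontend" c d e ha (by decide)]
    simp [cand]
  · rw [calc_c table a b c d e ha hb]; simp [cand, hb]

theorem calc_a (table : List (String × List (String × List (String × List (String × List Int))))) (a b c d : String) (e : Int) :
    calc_py table a b c d e =
      ((cand a pvLg).map (fun a2 =>
        ((cand b pvWork).map (fun b2 =>
          ((cand c pvCareer).map (fun c2 =>
            ((cand d pvFood).map (fun d2 => pvVal table a2 b2 c2 d2 e)).sum)).sum)).sum)).sum := by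
  by_cases ha : a = "-"
  · rw [calc_py]
    simp [ha, pvLg, List.attach, List.attachWith, List.foldl]
    rw [calc_b table "cpp" b c d e (by decide),
        calc_b table "java" b c d e (by decide),
        calc_b table "python" b c d e (by decide)]
    simp [cand]
    ring
  · rw [calc_b table a b c d e ha]; simp [cand, ha]

theorem calc_alt_sum (table : List (String × List (String × List (String × List (String × List Int))))) (a b c d : String) (e : Int) :
    calc_py_alt table a b c d e =
      ((cand a pvLg).map (fun a2 =>
        ((cand b pvWork).map (fun b2 =>
          ((cand c pvCareer).map (fun c2 =>
            ((cand d pvFood).map (fun d2 => pvVal table a2 b2 c2 d2 e)).sum)).sum)).sum)).sum := by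
  simp only [calc_py_alt]
  rw [pv_foldl_add (fun p : String × String × String × String =>
        (((tabGet table p.1 p.2.1 p.2.2.1 p.2.2.2).length : Int) -
          ((bisectLeft (tabGet table p.1 p.2.1 p.2.2.1 p.2.2.2) e : Nat) : Int)))]
  rw [zero_add, pv_sum_flatMap]
  refine congrArg List.sum (List.map_congr_left fun a2 _ => ?_)
  rw [pv_sum_flatMap]
  refine congrArg List.sum (List.map_congr_left fun b2 _ => ?_)
  rw [pv_sum_flatMap]
  refine congrArg List.sum (List.map_congr_left fun c2 _ => ?_)
  simp [pvVal, List.map_map, Function.comp_def]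

-- ===== VERDICT (by name: the statement is the Claim_ definition above) =====
theorem calc_py_spec : Claim_equal_calc_py := by
  intro table a b c d e _ _
  unfold Spec_calc_py
  rw [calc_a, calc_alt_sum]
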